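-- pv_equiv track=rewrite | github.com/kensho-technologies/graphql-compiler | graphql_compiler/query_pagination/filter_modifications.py | _find_unused_parameter_names_for_pagination
-- ===== SOURCE A (Python) =====
-- RESERVED_PARAMETER_PREFIX = '__paged_'
--
-- def _find_unused_parameter_names_for_pagination(parameters):
--     """Return unused parameter names for lower and upper bound pagination parameters."""
--     # Since there are only len(parameters) defined parameter names, by the pigeonhole principle,
--     # we're certain we will find two unused pagination parameters after len(parameters) + 1
--     # attempts.
--     parameter_naming_attempts = len(parameters) + 1
--     for index in range(parameter_naming_attempts):
--         paged_lower_param = RESERVED_PARAMETER_PREFIX + 'lower_bound_{}'.format(index)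
--         paged_upper_param = RESERVED_PARAMETER_PREFIX + 'upper_bound_{}'.format(index)
--
--         if (
--             paged_lower_param not in parameters.keys() and
--             paged_upper_param not in parameters.keys()
--         ):
--             return paged_lower_param, paged_upper_param
--
--     raise AssertionError(u'Could not find unused parameter names after {} tries: {}'
--                          .format(parameter_naming_attempts, parameters))
-- ===== SOURCE B (Python) =====
-- RESERVED_PARAMETER_PREFIX = '__paged_'
--
-- _LOWER_PREFIX = RESERVED_PARAMETER_PREFIX + 'lower_bound_'
-- _UPPER_PREFIX = RESERVED_PARAMETER_PREFIX + 'upper_bound_'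
--
--
-- def _canonical_index(key, prefix):
--     """Return the index n such that key == prefix + str(n), or None if there is none."""
--     if not key.startswith(prefix):
--         return None
--     suffix = key[len(prefix):]
--     if not suffix or (len(suffix) > 1 and suffix[0] == '0'):
--         return None  # empty, or a non-canonical leading zero: never equal to str(n)
--     value = 0
--     for ch in suffix:
--         if ch < '0' or ch > '9':
--             return None
--         value = value * 10 + (ord(ch) - ord('0'))
--     return value
--
--
-- def _find_unused_parameter_names_for_pagination(parameters):
--     """Return unused parameter names for lower and upper bound pagination parameters."""
--     # Parse each key into the pagination index it occupies, if any.  A key can match at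
--     # most one of the two prefixes, so each key contributes at most one taken index.
--     taken = set()
--     for key in parameters:
--         index = _canonical_index(key, _LOWER_PREFIX)
--         if index is None:
--             index = _canonical_index(key, _UPPER_PREFIX)
--         if index is not None:
--             taken.add(index)
--     # The answer's index is the minimum excludant of the taken set: scan its sorted
--     # distinct elements, which block consecutive indices exactly while they equal the counter.
--     index = 0
--     for t in sorted(taken):
--         if t == index:
--             index += 1
--         else:
--             break
--     return _LOWER_PREFIX + str(index), _UPPER_PREFIX + str(index)
-- ===== Notes on version B (the rewrite author's own statement) =====
-- stated objective: alternative
-- what changed: Instead of A's index-by-index probing of candidate names against the key set, B parses each key once into the pagination index it occupies (canonical decimal suffix after the lower/upper prefix) and computes the answer's index directly as the minimum excludant of the sorted taken-index set.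
import Mathlib
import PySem

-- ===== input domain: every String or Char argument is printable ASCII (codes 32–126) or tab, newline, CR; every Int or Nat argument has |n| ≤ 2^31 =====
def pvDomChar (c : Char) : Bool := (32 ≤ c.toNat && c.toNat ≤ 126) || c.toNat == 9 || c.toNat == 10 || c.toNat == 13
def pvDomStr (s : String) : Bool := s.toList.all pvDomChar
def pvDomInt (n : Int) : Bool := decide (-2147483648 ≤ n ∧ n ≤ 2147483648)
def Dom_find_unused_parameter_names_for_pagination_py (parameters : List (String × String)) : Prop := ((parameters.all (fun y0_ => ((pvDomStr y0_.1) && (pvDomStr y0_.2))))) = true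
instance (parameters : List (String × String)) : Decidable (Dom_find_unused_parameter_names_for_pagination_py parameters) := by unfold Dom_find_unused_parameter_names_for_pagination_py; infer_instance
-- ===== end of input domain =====

-- B (alternative algorithm): instead of A's probing of candidate names index by index, B parses
-- each key into the pagination index it occupies (canonical decimal suffix after either prefix)
-- and computes the answer's index as the minimum excludant of the sorted taken-index set.

-- ===== PORT A =====
-- RESERVED_PARAMETER_PREFIX = '__paged_'
def pvReservedPrefix : String := "__paged_"

-- A's for-loop over range(parameter_naming_attempts); [] = loop exhausted, where the Python
-- raises AssertionError — unreachable by the pigeonhole argument in A's own comment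
def pvAgo (keys : List String) : List Int → String × String
  | [] => ("", "")
  | index :: rest =>
    let paged_lower_param := pvReservedPrefix ++ ("lower_bound_" ++ PySem.Int.toStr index)
    let paged_upper_param := pvReservedPrefix ++ ("upper_bound_" ++ PySem.Int.toStr index)
    if ¬ paged_lower_param ∈ keys ∧ ¬ paged_upper_param ∈ keys then
      (paged_lower_param, paged_upper_param)
    else pvAgo keys rest

def find_unused_parameter_names_for_pagination_py (parameters : List (String × String)) : String × String :=
  pvAgo (parameters.map Prod.fst) (PySem.List.pyRange 0 ((parameters.length : Int) + 1) 1)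

-- ===== PORT B =====
def pvLowerPrefix : String := pvReservedPrefix ++ "lower_bound_"
def pvUpperPrefix : String := pvReservedPrefix ++ "upper_bound_"

-- the digit loop of _canonical_index ('return None' inside the loop = the none branch)
def pvDigits : List Char → Nat → Option Nat
  | [], value => some value
  | c :: cs, value =>
    if '0' ≤ c ∧ c ≤ '9' then pvDigits cs (value * 10 + (c.toNat - 48)) else none

-- the canonicity guard of _canonical_index: empty or leading-zero suffixes are never str(n)
def pvCanon? : List Char → Option Nat
  | [] => none
  | c :: rest => if rest ≠ [] ∧ c = '0' then none else pvDigits (c :: rest) 0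

-- _canonical_index(key, prefix)
def pvCanonIndex (key prefx : String) : Option Nat :=
  if PySem.Str.startswith key prefx then
    pvCanon? (PySem.Str.slice key (some (PySem.Str.len prefx)) none).toList
  else none

-- the first loop of B: parse each key, collecting the set of taken indices
def pvTakenIdx (keys : List String) : PySem.Set Nat :=
  keys.foldl (fun taken key =>
    match (pvCanonIndex key pvLowerPrefix).orElse (fun _ => pvCanonIndex key pvUpperPrefix) with
    | some v => PySem.Set.add taken v
    | none => taken) PySem.Set.empty

-- the second loop of B: minimum excludant scan over the sorted taken indices (break = return index)
def pvMex : Nat → List Nat → Nat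
  | index, [] => index
  | index, t :: rest => if t = index then pvMex (index + 1) rest else index

def find_unused_parameter_names_for_pagination_py_alt (parameters : List (String × String)) : String × String :=
  let taken := pvTakenIdx (parameters.map Prod.fst)
  let index := pvMex 0 (PySem.List.sorted taken (fun x => x) false)
  (pvLowerPrefix ++ PySem.Int.toStr (index : Int), pvUpperPrefix ++ PySem.Int.toStr (index : Int))

-- ===== PRECONDITION & SPEC =====
def Spec_find_unused_parameter_names_for_pagination_py (parameters : List (String × String)) (out : String × String) : Prop := out = find_unused_parameter_names_for_pagination_py_alt parameters
instance (parameters : List (String × String)) (out : String × String) : Decidable (Spec_find_unused_parameter_names_for_pagination_py parameters out) := by unfold Spec_find_unused_parameter_names_for_pagination_py; infer_instance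

-- ===== CLAIM (what is proved, stated in full; the proofs are below) =====
def Claim_equal_find_unused_parameter_names_for_pagination_py : Prop := ∀ (parameters : List (String × String)), Dom_find_unused_parameter_names_for_pagination_py parameters → Spec_find_unused_parameter_names_for_pagination_py parameters (find_unused_parameter_names_for_pagination_py parameters)

-- ===== LEMMAS AND PROOFS =====

-- canonical decimal digits of n, most significant first (proved equal to Nat.toDigits 10 below)
def pvD (n : Nat) : List Char :=
  if _h : n < 10 then [Nat.digitChar n] else pvD (n / 10) ++ [Nat.digitChar (n % 10)]
  decreasing_by exact Nat.div_lt_self (by omega) (by omega)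

-- the accumulated value of a digit string
def pvVal (s : List Char) : Nat := s.foldl (fun v c => v * 10 + (c.toNat - 48)) 0

def pvIsDigit (c : Char) : Prop := '0' ≤ c ∧ c ≤ '9'

theorem pv_digitChar_isDigit {d : Nat} (h : d < 10) : pvIsDigit (Nat.digitChar d) := by
  interval_cases d <;> exact ⟨by decide, by decide⟩

theorem pv_digitChar_toNat {d : Nat} (h : d < 10) : (Nat.digitChar d).toNat - 48 = d := by
  interval_cases d <;> decide

theorem pv_isDigit_toNat {c : Char} (h : pvIsDigit c) : 48 ≤ c.toNat ∧ c.toNat ≤ 57 := by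
  obtain ⟨h1, h2⟩ := h
  exact ⟨h1, h2⟩

theorem pv_str_eq_of_toList {a b : String} (h : a.toList = b.toList) : a = b :=
  String.ext (by simpa [String.toList] using h)

theorem pv_digitChar_toNat' {d : Nat} (h : d < 10) : (Nat.digitChar d).toNat = 48 + d := by
  interval_cases d <;> decide

theorem pv_char_eq_of_toNat {c d : Char} (h : c.toNat = d.toNat) : c = d :=
  Char.ext (UInt32.toNat_inj.mp h)

theorem pv_digitChar_eq {c : Char} (h : pvIsDigit c) : Nat.digitChar (c.toNat - 48) = c := by
  have hb := pv_isDigit_toNat h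
  apply pv_char_eq_of_toNat
  have h9 : c.toNat - 48 < 10 := by omega
  rw [pv_digitChar_toNat' h9]
  omega

theorem pvD_lt {n : Nat} (h : n < 10) : pvD n = [Nat.digitChar n] := by
  rw [pvD]; simp [h]

theorem pvD_ge {n : Nat} (h : 10 ≤ n) : pvD n = pvD (n / 10) ++ [Nat.digitChar (n % 10)] := by
  rw [pvD]; simp [Nat.not_lt.mpr h]

theorem pvD_ne_nil (n : Nat) : pvD n ≠ [] := by
  by_cases h : n < 10
  · rw [pvD_lt h]; simp
  · rw [pvD_ge (by omega)]; simp

theorem pvD_head_ne_zero {n : Nat} (h : 1 ≤ n) : (pvD n).head? ≠ some '0' := by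
  induction n using Nat.strong_induction_on with
  | _ n ih =>
    by_cases h10 : n < 10
    · rw [pvD_lt h10]
      interval_cases n <;> decide
    · rw [pvD_ge (by omega), List.head?_append_of_ne_nil _ (pvD_ne_nil _)]
      exact ih (n / 10) (Nat.div_lt_self (by omega) (by omega)) (by omega)

theorem pvD_digits (n : Nat) : ∀ c ∈ pvD n, pvIsDigit c := by
  induction n using Nat.strong_induction_on with
  | _ n ih =>
    by_cases h10 : n < 10
    · rw [pvD_lt h10]
      intro c hc
      rw [List.mem_singleton] at hc
      subst hc
      exact pv_digitChar_isDigit h10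
    · rw [pvD_ge (by omega)]
      intro c hc
      rcases List.mem_append.mp hc with h | h
      · exact ih (n / 10) (Nat.div_lt_self (by omega) (by omega)) c h
      · rw [List.mem_singleton] at h
        subst h
        exact pv_digitChar_isDigit (Nat.mod_lt _ (by omega))

theorem pvVal_D (n : Nat) : pvVal (pvD n) = n := by
  induction n using Nat.strong_induction_on with
  | _ n ih =>
    by_cases h10 : n < 10
    · rw [pvD_lt h10]
      simp [pvVal, pv_digitChar_toNat h10]
    · rw [pvD_ge (by omega)]
      unfold pvVal
      rw [List.foldl_append]
      have := ih (n / 10) (Nat.div_lt_self (by omega) (by omega))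
      unfold pvVal at this
      rw [this]
      rw [List.foldl_cons, List.foldl_nil, pv_digitChar_toNat (Nat.mod_lt n (y := 10) (by omega))]
      omega

-- pvDigits succeeds exactly on all-digit strings, computing pvVal
theorem pvDigits_of_digits : ∀ (s : List Char) (v : Nat), (∀ c ∈ s, pvIsDigit c) →
    pvDigits s v = some (s.foldl (fun v c => v * 10 + (c.toNat - 48)) v) := by
  intro s
  induction s with
  | nil => intro v _; rfl
  | cons c cs ih =>
    intro v h
    rw [pvDigits, if_pos (show '0' ≤ c ∧ c ≤ '9' from h c (by simp)), List.foldl_cons]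
    exact ih _ (fun d hd => h d (by simp [hd]))

theorem pvDigits_some_digits : ∀ (s : List Char) (v j : Nat), pvDigits s v = some j →
    ∀ c ∈ s, pvIsDigit c := by
  intro s
  induction s with
  | nil => intro v j _ c hc; simp at hc
  | cons c cs ih =>
    intro v j h d hd
    rw [pvDigits] at h
    by_cases hc : '0' ≤ c ∧ c ≤ '9'
    · rw [if_pos hc] at h
      rcases List.mem_cons.mp hd with h' | h'
      · subst h'; exact hc
      · exact ih _ _ h d h'
    · rw [if_neg hc] at h
      exact absurd h (by simp)

theorem pv_foldl_ge (s : List Char) : ∀ v : Nat, v ≤ s.foldl (fun v c => v * 10 + (c.toNat - 48)) v := by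
  induction s with
  | nil => intro v; simp
  | cons c cs ih =>
    intro v
    rw [List.foldl_cons]
    exact le_trans (by omega) (ih (v * 10 + (c.toNat - 48)))

-- positive value for a nonempty digit string not starting with '0'
theorem pvVal_pos {s : List Char} (hne : s ≠ []) (hd : ∀ c ∈ s, pvIsDigit c)
    (hz : s.head? ≠ some '0') : 1 ≤ pvVal s := by
  obtain ⟨c, t, rfl⟩ := List.exists_cons_of_ne_nil hne
  have hc : pvIsDigit c := hd c (by simp)
  have hb := pv_isDigit_toNat hc
  have hc0 : c ≠ '0' := by intro h; subst h; simp at hz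
  have hne48 : c.toNat ≠ 48 := by
    intro h; exact hc0 (pv_char_eq_of_toNat (show c.toNat = ('0' : Char).toNat by simpa using h))
  unfold pvVal
  rw [List.foldl_cons]
  exact le_trans (by omega) (pv_foldl_ge t _)

-- canonical strings are exactly the pvD images
theorem pv_canon_eq_D {s : List Char} (hne : s ≠ []) (hd : ∀ c ∈ s, pvIsDigit c)
    (hz : 1 < s.length → s.head? ≠ some '0') : s = pvD (pvVal s) := by
  induction s using List.reverseRecOn with
  | nil => exact absurd rfl hne
  | append_singleton xs c ihx =>
    have hc : pvIsDigit c := hd c (by simp)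
    have hcb := pv_isDigit_toNat hc
    rcases List.eq_nil_or_concat' xs with rfl | _
    · have hd10 : c.toNat - 48 < 10 := by omega
      simp only [List.nil_append]
      rw [show pvVal [c] = c.toNat - 48 by simp [pvVal], pvD_lt hd10, pv_digitChar_eq hc]
    · have hxs : xs ≠ [] := by rintro rfl; simp_all
      have hlen : 1 < (xs ++ [c]).length := by
        rw [List.length_append]
        have := List.length_pos_of_ne_nil hxs
        simp
        omega
      have hz' := hz hlen
      rw [List.head?_append_of_ne_nil _ hxs] at hz'
      have hdx : ∀ d ∈ xs, pvIsDigit d := fun d hdm => hd d (by simp [hdm])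
      have hvx : 1 ≤ pvVal xs := pvVal_pos hxs hdx hz'
      have hval : pvVal (xs ++ [c]) = pvVal xs * 10 + (c.toNat - 48) := by
        unfold pvVal
        rw [List.foldl_append, List.foldl_cons, List.foldl_nil]
      have h10 : 10 ≤ pvVal (xs ++ [c]) := by omega
      rw [hval, pvD_ge (by omega)]
      have hdiv : (pvVal xs * 10 + (c.toNat - 48)) / 10 = pvVal xs := by omega
      have hmod : (pvVal xs * 10 + (c.toNat - 48)) % 10 = c.toNat - 48 := by omega
      rw [hdiv, hmod, pv_digitChar_eq hc]
      have hzx : 1 < xs.length → xs.head? ≠ some '0' := fun _ => hz'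
      rw [← ihx hxs hdx hzx]

-- the two canonical-parse characterization lemmas
theorem pvCanon_D (n : Nat) : pvCanon? (pvD n) = some n := by
  obtain ⟨c, rest, hD⟩ := List.exists_cons_of_ne_nil (pvD_ne_nil n)
  rw [hD, pvCanon?]
  have hguard : ¬ (rest ≠ [] ∧ c = '0') := by
    rintro ⟨hr, rfl⟩
    have hlen : 1 < (pvD n).length := by rw [hD]; cases rest <;> simp_all
    have hn : ¬ n < 10 := by
      intro h10
      rw [pvD_lt h10] at hD hlen
      simp at hlen
    have h1 : 1 ≤ n := by omega
    have := pvD_head_ne_zero h1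
    rw [hD] at this
    simp at this
  rw [if_neg hguard, ← hD,
    pvDigits_of_digits (pvD n) 0 (pvD_digits n)]
  have := pvVal_D n
  unfold pvVal at this
  rw [this]

theorem pvCanon_some {s : List Char} {j : Nat} (h : pvCanon? s = some j) : s = pvD j := by
  match s with
  | [] => exact absurd h (by simp [pvCanon?])
  | c :: rest =>
    rw [pvCanon?] at h
    by_cases hg : rest ≠ [] ∧ c = '0'
    · rw [if_pos hg] at h; exact absurd h (by simp)
    · rw [if_neg hg] at h
      have hd : ∀ d ∈ c :: rest, pvIsDigit d := pvDigits_some_digits _ _ _ h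
      have hval : pvDigits (c :: rest) 0 = some (pvVal (c :: rest)) :=
        pvDigits_of_digits _ 0 hd
      rw [hval] at h
      have hj : pvVal (c :: rest) = j := by simpa using h
      have hz : 1 < (c :: rest).length → (c :: rest).head? ≠ some '0' := by
        intro hlen
        have hr : rest ≠ [] := by cases rest <;> simp_all
        simp only [List.head?_cons, ne_eq, Option.some.injEq]
        intro hc
        exact hg ⟨hr, hc⟩
      rw [← hj]
      exact pv_canon_eq_D (by simp) hd hz

-- str(index) for a nonnegative index is exactly pvD
theorem pv_toDigitsCore_eq : ∀ (f n : Nat) (acc : List Char), n < f →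
    Nat.toDigitsCore 10 f n acc = pvD n ++ acc := by
  intro f
  induction f with
  | zero => intro n acc h; omega
  | succ f ih =>
    intro n acc h
    rw [Nat.toDigitsCore]
    by_cases h0 : n / 10 = 0
    · have h10 : n < 10 := by omega
      rw [if_pos h0, pvD_lt h10, Nat.mod_eq_of_lt h10]
      simp
    · have h10 : 10 ≤ n := by
        by_contra hlt
        exact h0 (Nat.div_eq_of_lt (by omega))
      rw [if_neg h0, ih (n / 10) _ (by omega), pvD_ge h10]
      simp

theorem pv_toStr_nat (j : Nat) : (PySem.Int.toStr (j : Int)).toList = pvD j := by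
  rw [PySem.Int.toStr, String.toList_ofList, PySem.Int.toChars]
  rw [if_neg (by omega)]
  show Nat.toDigits 10 (j : Int).toNat = pvD j
  rw [Nat.toDigits, Int.toNat_natCast]
  simpa using pv_toDigitsCore_eq (j + 1) j [] (by omega)

-- prefix decomposition: startswith + slicing the prefix off is exactly "k = p ++ s"
theorem pv_prefix_slice_iff (k p s : String) :
    (PySem.Str.startswith k p = true ∧ PySem.Str.slice k (some (PySem.Str.len p)) none = s)
      ↔ k = p ++ s := by
  have hlist : ∀ a b : String, a = b ↔ a.toList = b.toList := by
    intro a b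
    constructor
    · intro h; rw [h]
    · intro h; exact String.ext (by simpa [String.toList] using h)
  rw [PySem.Str.startswith_eq, PySem.Chars.startswith_iff, hlist (PySem.Str.slice _ _ _) s,
      hlist k (p ++ s), String.toList_append, PySem.Str.toList_slice,
      PySem.Chars.slice_eq_listSlice, PySem.Str.len_eq, PySem.List.slice_from_natCast]
  constructor
  · rintro ⟨⟨t, ht⟩, hd⟩
    rw [← ht] at hd ⊢
    simp at hd
    rw [hd]
  · intro h
    rw [h]
    simp

theorem pv_not_sw_up_low (s : String) : PySem.Str.startswith (pvUpperPrefix ++ s) pvLowerPrefix = false := by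
  rw [Bool.eq_false_iff]
  intro h
  rw [PySem.Str.startswith_eq, PySem.Chars.startswith_iff, String.toList_append] at h
  have hl := List.prefix_iff_eq_take.mp h
  have hlen : pvLowerPrefix.toList.length = pvUpperPrefix.toList.length := by decide
  rw [hlen, List.take_left] at hl
  exact absurd hl (by decide)

-- _canonical_index(key, prefix) = j exactly when key = prefix + str(j)
theorem pv_canonIndex_iff (k p : String) (j : Nat) :
    pvCanonIndex k p = some j ↔ k = p ++ PySem.Int.toStr (j : Int) := by
  rw [pvCanonIndex]
  constructor
  · intro h
    by_cases hsw : PySem.Str.startswith k p = true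
    · rw [if_pos hsw] at h
      have hs := pvCanon_some h
      have hslice : PySem.Str.slice k (some (PySem.Str.len p)) none = PySem.Int.toStr (j : Int) := by
        apply pv_str_eq_of_toList
        rw [hs, pv_toStr_nat]
      exact (pv_prefix_slice_iff k p _).mp ⟨hsw, hslice⟩
    · rw [if_neg hsw] at h
      exact absurd h (by simp)
  · intro h
    obtain ⟨hsw, hslice⟩ := (pv_prefix_slice_iff k p (PySem.Int.toStr (j : Int))).mpr h
    rw [if_pos hsw, hslice]
    have : (PySem.Int.toStr (j : Int)).toList = pvD j := pv_toStr_nat j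
    rw [this, pvCanon_D]

-- membership in a fold of optional Set.add steps
theorem pv_mem_fold_opt (f : String → Option Nat) (keys : List String) (acc : PySem.Set Nat) (j : Nat) :
    j ∈ keys.foldl (fun taken key =>
      match f key with
      | some v => PySem.Set.add taken v
      | none => taken) acc
      ↔ j ∈ acc ∨ ∃ k ∈ keys, f k = some j := by
  induction keys generalizing acc with
  | nil => simp
  | cons k ks ih =>
    rw [List.foldl_cons, ih]
    cases hfk : f k with
    | none =>
      simp only [List.mem_cons]
      constructor
      · rintro (h | ⟨k', hk', h'⟩)
        · exact Or.inl h
        · exact Or.inr ⟨k', Or.inr hk', h'⟩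
      · rintro (h | ⟨k', (rfl | hk'), h'⟩)
        · exact Or.inl h
        · rw [hfk] at h'; exact absurd h' (by simp)
        · exact Or.inr ⟨k', hk', h'⟩
    | some v =>
      simp only [PySem.Set.mem_add, List.mem_cons]
      constructor
      · rintro ((h | rfl) | ⟨k', hk', h'⟩)
        · exact Or.inl h
        · exact Or.inr ⟨k, Or.inl rfl, hfk⟩
        · exact Or.inr ⟨k', Or.inr hk', h'⟩
      · rintro (h | ⟨k', (rfl | hk'), h'⟩)
        · exact Or.inl (Or.inl h)
        · rw [hfk] at h'
          exact Or.inl (Or.inr (by simpa using h'.symm))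
        · exact Or.inr ⟨k', hk', h'⟩

-- the taken-index set holds exactly the indices whose lower or upper name is a key
theorem pv_mem_taken (keys : List String) (j : Nat) :
    j ∈ pvTakenIdx keys ↔
      (pvLowerPrefix ++ PySem.Int.toStr (j : Int)) ∈ keys ∨
      (pvUpperPrefix ++ PySem.Int.toStr (j : Int)) ∈ keys := by
  rw [pvTakenIdx, pv_mem_fold_opt]
  simp only [PySem.Set.empty]
  constructor
  · rintro (h | ⟨k, hk, h⟩)
    · simp at h
    · rcases hoe : pvCanonIndex k pvLowerPrefix with _ | v
      · rw [hoe] at h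
        simp only [Option.orElse] at h
        have := (pv_canonIndex_iff k pvUpperPrefix j).mp h
        exact Or.inr (this ▸ hk)
      · rw [hoe] at h
        simp only [Option.orElse] at h
        have hv : v = j := by simpa using h
        subst hv
        have := (pv_canonIndex_iff k pvLowerPrefix v).mp hoe
        exact Or.inl (this ▸ hk)
  · intro h
    refine Or.inr ?_
    rcases h with h | h
    · refine ⟨_, h, ?_⟩
      have hl : pvCanonIndex (pvLowerPrefix ++ PySem.Int.toStr (j : Int)) pvLowerPrefix = some j :=
        (pv_canonIndex_iff _ _ _).mpr rfl
      rw [hl]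
      rfl
    · refine ⟨_, h, ?_⟩
      have hu : pvCanonIndex (pvUpperPrefix ++ PySem.Int.toStr (j : Int)) pvUpperPrefix = some j :=
        (pv_canonIndex_iff _ _ _).mpr rfl
      have hl : pvCanonIndex (pvUpperPrefix ++ PySem.Int.toStr (j : Int)) pvLowerPrefix = none := by
        rw [pvCanonIndex, pv_not_sw_up_low]
        simp
      rw [hl]
      simp only [Option.orElse]
      exact hu

theorem pv_foldl_opt_nodup (f : String → Option Nat) (keys : List String) (acc : PySem.Set Nat)
    (h : acc.Nodup) :
    (keys.foldl (fun taken key =>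
      match f key with
      | some v => PySem.Set.add taken v
      | none => taken) acc).Nodup := by
  induction keys generalizing acc with
  | nil => exact h
  | cons k ks ih =>
    rw [List.foldl_cons]
    cases f k with
    | none => exact ih _ h
    | some v => exact ih (PySem.Set.add acc v) (PySem.Set.nodup_add _ _ h)

theorem pv_taken_nodup (keys : List String) : (pvTakenIdx keys).Nodup := by
  exact pv_foldl_opt_nodup _ keys _ (by simp [PySem.Set.empty])

theorem pv_set_add_length (s : PySem.Set Nat) (v : Nat) :
    (PySem.Set.add s v).length ≤ s.length + 1 := by
  rw [PySem.Set.add]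
  split
  · omega
  · simp

theorem pv_foldl_opt_length (f : String → Option Nat) (keys : List String) (acc : PySem.Set Nat) :
    (keys.foldl (fun taken key =>
      match f key with
      | some v => PySem.Set.add taken v
      | none => taken) acc).length ≤ acc.length + keys.length := by
  induction keys generalizing acc with
  | nil => simp
  | cons k ks ih =>
    rw [List.foldl_cons]
    cases f k with
    | none => exact le_trans (ih acc) (by simp)
    | some v =>
      refine le_trans (ih _) ?_
      have := pv_set_add_length acc v
      simp
      omega

theorem pv_taken_length (keys : List String) : (pvTakenIdx keys).length ≤ keys.length := by
  have := pv_foldl_opt_length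
    (fun key => (pvCanonIndex key pvLowerPrefix).orElse (fun _ => pvCanonIndex key pvUpperPrefix))
    keys PySem.Set.empty
  simpa [pvTakenIdx, PySem.Set.empty] using this

-- mex scan bound and specification
theorem pvMex_le (l : List Nat) : ∀ i : Nat, pvMex i l ≤ i + l.length := by
  induction l with
  | nil => intro i; simp [pvMex]
  | cons t rest ih =>
    intro i
    rw [pvMex]
    split
    · have := ih (i + 1)
      simp
      omega
    · simp

theorem pvMex_spec (l : List Nat) : ∀ i : Nat, l.Pairwise (· < ·) → (∀ x ∈ l, i ≤ x) →
    pvMex i l ∉ l ∧ i ≤ pvMex i l ∧ ∀ j : Nat, i ≤ j → j < pvMex i l → j ∈ l := by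
  induction l with
  | nil =>
    intro i _ _
    refine ⟨by simp, le_refl i, fun j hij hji => ?_⟩
    rw [pvMex] at hji
    omega
  | cons t rest ih =>
    intro i hpw hlb
    have hpw' := (List.pairwise_cons.mp hpw).2
    have hhead := (List.pairwise_cons.mp hpw).1
    rw [pvMex]
    by_cases ht : t = i
    · rw [if_pos ht]
      subst ht
      have hlb' : ∀ x ∈ rest, t + 1 ≤ x := fun x hx => hhead x hx
      obtain ⟨h1, h2, h3⟩ := ih (t + 1) hpw' hlb'
      refine ⟨?_, by omega, ?_⟩
      · intro hmem
        rcases List.mem_cons.mp hmem with h | h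
        · omega
        · exact h1 h
      · intro j hij hji
        by_cases hjt : j = t
        · subst hjt; exact List.mem_cons_self
        · exact List.mem_cons_of_mem _ (h3 j (by omega) hji)
    · rw [if_neg ht]
      refine ⟨?_, le_refl i, fun j hij hji => by omega⟩
      intro hmem
      rcases List.mem_cons.mp hmem with h | h
      · exact ht h.symm
      · have := hhead i h
        have := hlb t List.mem_cons_self
        omega

-- A's scan returns the pair at the first free index
theorem pv_ago_range (keys : List String) (M : Int)
    (hfreeM : ¬ (pvReservedPrefix ++ ("lower_bound_" ++ PySem.Int.toStr M)) ∈ keys ∧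
              ¬ (pvReservedPrefix ++ ("upper_bound_" ++ PySem.Int.toStr M)) ∈ keys) :
    ∀ (cnt : Nat) (a : Int), a ≤ M → M < a + cnt →
    (∀ j : Int, a ≤ j → j < M →
      ¬ (¬ (pvReservedPrefix ++ ("lower_bound_" ++ PySem.Int.toStr j)) ∈ keys ∧
         ¬ (pvReservedPrefix ++ ("upper_bound_" ++ PySem.Int.toStr j)) ∈ keys)) →
    pvAgo keys (PySem.List.pyRange a (a + cnt) 1) =
      (pvReservedPrefix ++ ("lower_bound_" ++ PySem.Int.toStr M),
       pvReservedPrefix ++ ("upper_bound_" ++ PySem.Int.toStr M)) := by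
  intro cnt
  induction cnt with
  | zero => intro a h1 h2 _; omega
  | succ cnt ih =>
    intro a h1 h2 hblocked
    have hab : a < a + ((cnt : Nat) + 1 : Nat) := by push_cast; omega
    rw [PySem.List.pyRange_one_cons hab, pvAgo]
    by_cases haM : a = M
    · subst haM
      simp only [if_pos hfreeM]
    · have haltM : a < M := by omega
      rw [if_neg (hblocked a (le_refl a) haltM)]
      have harr : a + ((cnt : Nat) + 1 : Nat) = (a + 1) + (cnt : Nat) := by push_cast; omega
      rw [harr]
      exact ih (a + 1) (by omega) (by push_cast at h2 ⊢; omega)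
        (fun j hj1 hj2 => hblocked j (by omega) hj2)

-- ===== VERDICT (by name: the statement is the Claim_ definition above) =====
-- name reassociation: B's prefixes are A's prefix + tag
theorem pv_low_assoc (s : String) :
    pvLowerPrefix ++ s = pvReservedPrefix ++ ("lower_bound_" ++ s) := by
  rw [pvLowerPrefix, String.append_assoc]

theorem pv_up_assoc (s : String) :
    pvUpperPrefix ++ s = pvReservedPrefix ++ ("upper_bound_" ++ s) := by
  rw [pvUpperPrefix, String.append_assoc]

-- the master equivalence on the key list
theorem pv_main (keys : List String) :
    pvAgo keys (PySem.List.pyRange 0 ((keys.length : Int) + 1) 1) =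
      (pvLowerPrefix ++ PySem.Int.toStr ((pvMex 0 (PySem.List.sorted (pvTakenIdx keys) (fun x => x) false) : Nat) : Int),
       pvUpperPrefix ++ PySem.Int.toStr ((pvMex 0 (PySem.List.sorted (pvTakenIdx keys) (fun x => x) false) : Nat) : Int)) := by
  set taken := pvTakenIdx keys with htaken
  set l := PySem.List.sorted taken (fun x => x) false with hl
  set m := pvMex 0 l with hm
  -- the sorted taken list is strictly increasing
  have hperm : l.Perm taken := PySem.List.sorted_perm taken (fun x => x) false
  have hnodup : l.Nodup := hperm.nodup_iff.mpr (pv_taken_nodup keys)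
  have hle : l.Pairwise (fun a b => a ≤ b) := PySem.List.sorted_pairwise taken (fun x => x)
  have hlt : l.Pairwise (· < ·) := by
    have := List.Pairwise.and hle hnodup
    exact this.imp (fun h => lt_of_le_of_ne h.1 h.2)
  obtain ⟨hnotmem, _, hbelow⟩ := pvMex_spec l 0 hlt (fun x _ => Nat.zero_le x)
  have hmem_iff : ∀ j : Nat, j ∈ l ↔ j ∈ taken := fun j => hperm.mem_iff
  -- the bound: m ≤ keys.length
  have hmlen : m ≤ keys.length := by
    have h1 := pvMex_le l 0
    have h2 : l.length = taken.length := hperm.length_eq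
    have h3 := pv_taken_length keys
    rw [← htaken] at h3
    omega
  -- free / blocked in A's terms
  have hfree : ¬ (pvReservedPrefix ++ ("lower_bound_" ++ PySem.Int.toStr (m : Int))) ∈ keys ∧
               ¬ (pvReservedPrefix ++ ("upper_bound_" ++ PySem.Int.toStr (m : Int))) ∈ keys := by
    rw [← pv_low_assoc, ← pv_up_assoc]
    have := (hmem_iff m).not.mp hnotmem
    rw [pv_mem_taken] at this
    push Not at this
    exact this
  have hblocked : ∀ j : Int, 0 ≤ j → j < (m : Int) →
      ¬ (¬ (pvReservedPrefix ++ ("lower_bound_" ++ PySem.Int.toStr j)) ∈ keys ∧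
         ¬ (pvReservedPrefix ++ ("upper_bound_" ++ PySem.Int.toStr j)) ∈ keys) := by
    intro j hj0 hjm
    have hj : j = ((j.toNat : Nat) : Int) := by omega
    have hjn : (j.toNat : Nat) < m := by omega
    have hmem := (hmem_iff j.toNat).mp (hbelow j.toNat (Nat.zero_le _) hjn)
    rw [pv_mem_taken] at hmem
    rw [hj, ← pv_low_assoc, ← pv_up_assoc]
    tauto
  have h0 : (0 : Int) ≤ (m : Int) := by positivity
  have hcnt : (m : Int) < 0 + ((keys.length + 1 : Nat) : Nat) := by push_cast; omega
  have := pv_ago_range keys (m : Int) hfree (keys.length + 1) 0 h0 hcnt hblocked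
  rw [show ((0 : Int) + ((keys.length + 1 : Nat) : Nat)) = (keys.length : Int) + 1 by push_cast; ring] at this
  rw [this, pv_low_assoc, pv_up_assoc]

-- ===== VERDICT (by name: the statement is the Claim_ definition above) =====
theorem find_unused_parameter_names_for_pagination_py_spec : Claim_equal_find_unused_parameter_names_for_pagination_py := by
  intro parameters _
  unfold Spec_find_unused_parameter_names_for_pagination_py
  simp only [find_unused_parameter_names_for_pagination_py,
    find_unused_parameter_names_for_pagination_py_alt]
  have := pv_main (parameters.map Prod.fst)
  rw [List.length_map] at this
  exact this
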